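-- pv_equiv track=rewrite | github.com/hharshith2904/EduTrack | update_feedback.py | summarize_feedback
-- ===== SOURCE A (Python) =====
-- from collections import Counter
-- from typing import List, Dict
--
-- def summarize_feedback(feedback_list: List[Dict[str, str]]) -> Dict[str, int]:
--     """
--     Summarizes sentiment counts from a list of feedback entries.
--
--     Args:
--         feedback_list (List[Dict]): A list of feedback dicts with a 'sentiment' key.
--
--     Returns:
--         Dict[str, int]: A dictionary with total, positive, neutral, and negative counts.
--     """
--     sentiment_counter = Counter()
--
--     for entry in feedback_list:
--         sentiment = entry.get("sentiment", "unknown").lower()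
--         if sentiment in ["positive", "neutral", "negative"]:
--             sentiment_counter[sentiment] += 1
--
--     total = sum(sentiment_counter.values())
--     return {
--         "total_feedback": total,
--         "positive": sentiment_counter.get("positive", 0),
--         "neutral": sentiment_counter.get("neutral", 0),
--         "negative": sentiment_counter.get("negative", 0)
--     }
-- ===== SOURCE B (Python) =====
-- from typing import List, Dict
--
-- def summarize_feedback(feedback_list: List[Dict[str, str]]) -> Dict[str, int]:
--     """Summarizes sentiment counts: three independent counting passes, then sum."""
--     positive = sum(1 for e in feedback_list if e.get("sentiment", "unknown").lower() == "positive")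
--     neutral = sum(1 for e in feedback_list if e.get("sentiment", "unknown").lower() == "neutral")
--     negative = sum(1 for e in feedback_list if e.get("sentiment", "unknown").lower() == "negative")
--     return {
--         "total_feedback": positive + neutral + negative,
--         "positive": positive,
--         "neutral": neutral,
--         "negative": negative,
--     }
-- ===== Notes on version B (the rewrite author's own statement) =====
-- stated objective: alternative
-- what changed: Replaced the single stateful Counter-accumulating loop with three independent counting passes (one per sentiment category) whose sum gives the total.
import Mathlib
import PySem

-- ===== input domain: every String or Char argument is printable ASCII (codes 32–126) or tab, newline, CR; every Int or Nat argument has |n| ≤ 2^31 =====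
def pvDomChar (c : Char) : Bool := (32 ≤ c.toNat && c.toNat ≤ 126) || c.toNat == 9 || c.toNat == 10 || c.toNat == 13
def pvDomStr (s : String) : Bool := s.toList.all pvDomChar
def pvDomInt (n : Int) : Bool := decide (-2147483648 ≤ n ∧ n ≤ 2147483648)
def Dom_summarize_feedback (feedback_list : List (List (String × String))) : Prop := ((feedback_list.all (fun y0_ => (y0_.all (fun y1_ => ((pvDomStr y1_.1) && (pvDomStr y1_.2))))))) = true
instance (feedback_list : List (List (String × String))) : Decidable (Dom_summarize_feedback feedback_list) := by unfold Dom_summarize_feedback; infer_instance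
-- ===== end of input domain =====

-- B replaces A's single stateful Counter loop by three independent counting passes whose sum is the total (alternative decomposition, same cost).


-- ===== PORT A =====
-- entry.get("sentiment", "unknown").lower() — first match in the association list, as in Python
def summarize_feedback (feedback_list : List (List (String × String))) : List (String × Int) :=
  let sentiment_counter := feedback_list.foldl (fun d entry =>
      let sentiment := PySem.Str.lower ((PySem.Dict.mk entry).getD "sentiment" "unknown")
      if sentiment ∈ ["positive", "neutral", "negative"] then
        d.modify sentiment 0 (· + 1)
      else d)
    PySem.Dict.empty
  let total := sentiment_counter.values.sum
  [("total_feedback", total),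
   ("positive", sentiment_counter.getD "positive" 0),
   ("neutral", sentiment_counter.getD "neutral" 0),
   ("negative", sentiment_counter.getD "negative" 0)]

-- ===== PORT B =====
def summarize_feedback_alt (feedback_list : List (List (String × String))) : List (String × Int) :=
  let positive : Int := (feedback_list.countP (fun e => PySem.Str.lower ((PySem.Dict.mk e).getD "sentiment" "unknown") == "positive") : Int)
  let neutral : Int := (feedback_list.countP (fun e => PySem.Str.lower ((PySem.Dict.mk e).getD "sentiment" "unknown") == "neutral") : Int)
  let negative : Int := (feedback_list.countP (fun e => PySem.Str.lower ((PySem.Dict.mk e).getD "sentiment" "unknown") == "negative") : Int)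
  [("total_feedback", positive + neutral + negative),
   ("positive", positive),
   ("neutral", neutral),
   ("negative", negative)]

-- ===== PRECONDITION & SPEC =====
def Spec_summarize_feedback (feedback_list : List (List (String × String))) (out : List (String × Int)) : Prop := out = summarize_feedback_alt feedback_list
instance (feedback_list : List (List (String × String))) (out : List (String × Int)) : Decidable (Spec_summarize_feedback feedback_list out) := by unfold Spec_summarize_feedback; infer_instance

-- ===== CLAIM (what is proved, stated in full; the proofs are below) =====
def Claim_equal_summarize_feedback : Prop := ∀ (feedback_list : List (List (String × String))), Dom_summarize_feedback feedback_list → Spec_summarize_feedback feedback_list (summarize_feedback feedback_list)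

-- ===== LEMMAS AND PROOFS =====

-- normalized sentiment of one entry (proof-side abbreviation; both ports inline this expression)
def pvSent (e : List (String × String)) : String :=
  PySem.Str.lower ((PySem.Dict.mk e).getD "sentiment" "unknown")

-- the sum of a Counter's values is the length of the counted list
theorem pv_sum_values_counter (xs : List String) :
    (PySem.Dict.counter xs).values.sum = (xs.length : Int) := by
  have hperm : List.Perm (PySem.Set.ofList xs) xs.dedup := by
    refine (List.perm_ext_iff_of_nodup (PySem.Set.nodup_ofList xs) (List.nodup_dedup xs)).mpr ?_
    intro a; simp [PySem.Set.mem_ofList, List.mem_dedup]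
  have h1 : (PySem.Dict.counter xs).values = (PySem.Set.ofList xs).map (fun k => (xs.count k : Int)) := by
    simp [PySem.Dict.values, PySem.Dict.items_counter, List.map_map, Function.comp_def]
  rw [h1, List.Perm.sum_eq (hperm.map _)]
  have h2 : (xs.dedup.map (fun k => (xs.count k : Int))).sum = ((xs.dedup.map (fun k => xs.count k)).sum : Int) := by
    induction xs.dedup with
    | nil => simp
    | cons h t ih => simp [ih]
  rw [h2, List.sum_map_count_dedup_eq_length xs]

-- three exclusive equality counts add up
theorem pv_countP_or_three (xs : List String) :
    xs.countP (fun s => s == "positive" || s == "neutral" || s == "negative")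
      = xs.count "positive" + xs.count "neutral" + xs.count "negative" := by
  induction xs with
  | nil => rfl
  | cons x t ih =>
    by_cases h1 : x = "positive" <;> by_cases h2 : x = "neutral" <;> by_cases h3 : x = "negative" <;>
      simp [List.count_cons, h1, h2, h3, ih] <;> omega

-- membership in the three-element sentiment list splits into three exclusive counts
theorem pv_countP_mem_three (xs : List String) :
    xs.countP (fun s => decide (s ∈ ["positive", "neutral", "negative"]))
      = xs.count "positive" + xs.count "neutral" + xs.count "negative" := by
  rw [← pv_countP_or_three]
  apply List.countP_congr
  intro s _; simp; tauto

-- counting one target string in the mapped list is counting entries mapping to it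
theorem pv_count_map (l : List (List (String × String))) (a : String) :
    (l.map pvSent).count a = l.countP (fun e => pvSent e == a) := by
  simp [List.count, List.countP_map, Function.comp_def]

-- A's accumulating loop is the Counter of the filtered, normalized sentiments
theorem pv_loop_eq_counter (l : List (List (String × String))) :
    l.foldl (fun d entry =>
        let sentiment := pvSent entry
        if sentiment ∈ ["positive", "neutral", "negative"] then
          d.modify sentiment 0 (· + 1)
        else d) PySem.Dict.empty
      = PySem.Dict.counter ((l.map pvSent).filter (fun s => decide (s ∈ ["positive", "neutral", "negative"]))) := by
  rw [PySem.Dict.counter_eq_foldl, List.foldl_filter, List.foldl_map]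
  simp

-- ===== VERDICT (by name: the statement is the Claim_ definition above) =====
theorem summarize_feedback_spec : Claim_equal_summarize_feedback := by
  intro l _
  unfold Spec_summarize_feedback summarize_feedback summarize_feedback_alt
  have hloop := pv_loop_eq_counter l
  simp only [pvSent] at hloop
  rw [hloop]
  set ms := ((l.map pvSent).filter (fun s => decide (s ∈ ["positive", "neutral", "negative"]))) with hms
  have hpos : ms.count "positive" = (l.map pvSent).count "positive" := by
    rw [hms]; exact List.count_filter (by decide)
  have hneu : ms.count "neutral" = (l.map pvSent).count "neutral" := by
    rw [hms]; exact List.count_filter (by decide)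
  have hneg : ms.count "negative" = (l.map pvSent).count "negative" := by
    rw [hms]; exact List.count_filter (by decide)
  have hlen : ms.length = ms.count "positive" + ms.count "neutral" + ms.count "negative" := by
    rw [hms, ← List.countP_eq_length_filter]
    rw [pv_countP_mem_three ((l.map pvSent))]
    rw [← hms, hpos, hneu, hneg]
  simp only [PySem.Dict.getD_counter, pv_sum_values_counter, hlen, hpos, hneu, hneg,
    pv_count_map, pvSent]
  push_cast
  ring_nf
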